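-- pv_equiv track=rewrite | github.com/Mehtab404/SEIR_ASSIGNMENT | Assignment2.py | countBodyCharacter
-- ===== SOURCE A (Python) =====
-- def countBodyCharacter(body_content):
--     word_Dict = {}
--     for word_s in body_content.split():
--         stop_words = ["is","am","are","the","not","in","on","or","but","if","while","at","for","by"]
--         if word_s in stop_words: continue
--         if word_s.lower() in word_Dict:
--             word_Dict[word_s.lower()] = word_Dict[word_s.lower()] + 1
--         else:
--             word_Dict[word_s.lower()] = 1
--     return word_Dict
-- ===== SOURCE B (Python) =====
-- def countBodyCharacter(body_content):
--     stop_words = ["is","am","are","the","not","in","on","or","but","if","while","at","for","by"]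
--     kept = [w for w in body_content.split() if w not in stop_words]
--     words = [k.lower() for k in kept]
--     seen = []
--     for w in words:
--         if w not in seen:
--             seen.append(w)
--     return {k: words.count(k) for k in seen}
-- ===== Notes on version B (the rewrite author's own statement) =====
-- stated objective: alternative
-- what changed: Replaces A's single-pass branch-and-update dict accumulation with staged passes: filter out stop words, lowercase, build an explicit first-occurrence list of distinct keys, then count each key once over the token list.
import Mathlib
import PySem

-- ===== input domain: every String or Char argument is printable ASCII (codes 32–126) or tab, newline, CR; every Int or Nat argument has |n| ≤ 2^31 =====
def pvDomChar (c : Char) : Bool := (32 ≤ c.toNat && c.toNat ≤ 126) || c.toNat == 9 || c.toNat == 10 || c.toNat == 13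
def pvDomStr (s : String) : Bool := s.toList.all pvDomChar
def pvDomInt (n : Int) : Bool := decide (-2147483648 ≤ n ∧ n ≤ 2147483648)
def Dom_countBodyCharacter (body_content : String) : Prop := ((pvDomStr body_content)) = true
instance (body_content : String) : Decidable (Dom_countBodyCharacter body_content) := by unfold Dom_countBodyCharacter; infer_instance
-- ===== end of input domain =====

-- B replaces A's single-pass dict accumulation with staged passes (filter, lowercase,
-- first-occurrence dedup, per-key count); objective: alternative decomposition, not faster.

-- ===== PORT A =====
def countBodyCharacter (body_content : String) : List (String × Int) :=
  ((PySem.Str.split₀ body_content).foldl (fun word_Dict word_s =>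
      let stop_words := ["is","am","are","the","not","in","on","or","but","if","while","at","for","by"]
      if word_s ∈ stop_words then word_Dict
      else if word_Dict.contains (PySem.Str.lower word_s) then
        word_Dict.insert (PySem.Str.lower word_s) (word_Dict.getD (PySem.Str.lower word_s) 0 + 1)
      else
        word_Dict.insert (PySem.Str.lower word_s) 1)
    PySem.Dict.empty).items

-- ===== PORT B =====
def countBodyCharacter_alt (body_content : String) : List (String × Int) :=
  let stop_words := ["is","am","are","the","not","in","on","or","but","if","while","at","for","by"]
  let kept := (PySem.Str.split₀ body_content).filter (fun w => !(stop_words.contains w))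
  let words := kept.map (fun k => PySem.Str.lower k)
  let seen := words.foldl (fun seen w => if seen.contains w then seen else seen ++ [w]) []
  (seen.foldl (fun d k => d.insert k ((words.count k : Int))) PySem.Dict.empty).items

-- ===== PRECONDITION & SPEC =====
def Spec_countBodyCharacter (body_content : String) (out : List (String × Int)) : Prop := out = countBodyCharacter_alt body_content
instance (body_content : String) (out : List (String × Int)) : Decidable (Spec_countBodyCharacter body_content out) := by unfold Spec_countBodyCharacter; infer_instance

-- ===== CLAIM (what is proved, stated in full; the proofs are below) =====
def Claim_equal_countBodyCharacter : Prop := ∀ (body_content : String), Dom_countBodyCharacter body_content → Spec_countBodyCharacter body_content (countBodyCharacter body_content)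

-- ===== LEMMAS AND PROOFS =====

-- A's loop (skip stop words, lowercase, branch-and-update) is the counting fold over the
-- filtered-and-lowercased token list.
theorem foldA_eq_filter_map (stops : List String) :
    ∀ (ws : List String) (d : PySem.Dict String Int),
      ws.foldl (fun d w =>
          if w ∈ stops then d
          else if d.contains (PySem.Str.lower w) then
            d.insert (PySem.Str.lower w) (d.getD (PySem.Str.lower w) 0 + 1)
          else d.insert (PySem.Str.lower w) 1) d
      = ((ws.filter (fun w => !(stops.contains w))).map (fun k => PySem.Str.lower k)).foldl
          (fun d x => d.insert x (d.getD x 0 + 1)) d := by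
  intro ws
  induction ws with
  | nil => intro d; rfl
  | cons w ws ih =>
    intro d
    by_cases hw : w ∈ stops
    · simp [hw, ih]
    · have hwc : stops.contains w = false := by simpa using hw
      by_cases hc : d.contains (PySem.Str.lower w) = true
      · simp [hw, hc, ih]
      · have hcf : d.contains (PySem.Str.lower w) = false := by simpa using hc
        have h0 : d.getD (PySem.Str.lower w) 0 = 0 :=
          PySem.Dict.getD_of_not_contains d 0 hcf
        simp [hw, hcf, ih, h0]

-- B's explicit first-occurrence loop builds set(words) in order.
theorem seen_eq_ofList (words : List String) :
    words.foldl (fun seen w => if seen.contains w then seen else seen ++ [w]) []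
      = PySem.Set.ofList words := by
  have hfn : (fun (seen : List String) (w : String) =>
      if seen.contains w then seen else seen ++ [w]) = PySem.Set.add := by
    funext s w
    rw [PySem.Set.add_eq_ite]
    by_cases h : w ∈ s
    · simp [h]
    · simp [h]
  rw [hfn, PySem.Set.ofList_eq_foldl]

-- B's dict comprehension over the nodup key list pairs each key with its count.
theorem foldB_items (words : List String) :
    ((PySem.Set.ofList words).foldl
        (fun d k => d.insert k ((words.count k : Int))) PySem.Dict.empty).items
      = (PySem.Set.ofList words).map (fun k => (k, (words.count k : Int))) := by
  rw [PySem.Dict.items_foldl_insert_fresh]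
  · rfl
  · intro a _; exact PySem.Dict.contains_empty a
  · simp [PySem.Set.nodup_ofList words]

-- ===== VERDICT (by name: the statement is the Claim_ definition above) =====
theorem countBodyCharacter_spec : Claim_equal_countBodyCharacter := by
  intro body_content _
  simp only [Spec_countBodyCharacter, countBodyCharacter, countBodyCharacter_alt]
  rw [foldA_eq_filter_map, PySem.Dict.foldl_insert_getD_add_one_eq_counter,
    PySem.Dict.items_counter, seen_eq_ofList, foldB_items]
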